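-- pv_equiv track=rewrite | github.com/gtg7784/algorithm-study | naverhackathon/3.py | solution
-- ===== SOURCE A (Python) =====
-- def solution(A):
--     sum_num=0
--     for i in range(len(A)-1):
--         if(A[i]==A[i+1]):
--             flag=0
--             for k in range(i,0,-1):
--                 if(A[k]==A[k-1]):
--                     flag=k
--             min_num = i-flag+1
--             flag=len(A)
--             for k in range(i,len(A)-1):
--                 if(A[k]==A[k+1]):
--                     flag=k
--             if min_num > flag-i+1:
--                 sum_num = sum_num + min_num
--             else:
--                 sum_num = sum_num + flag-i+1
--     return sum_num
-- ===== SOURCE B (Python) =====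
-- def solution(A):
--     pairs = [i for i in range(len(A) - 1) if A[i] == A[i + 1]]
--     if not pairs:
--         return 0
--     f, l = pairs[0], pairs[-1]
--     total = 0
--     for i in pairs:
--         left = i - f if i > f else i + 1
--         total += max(left, l - i + 1)
--     return total
-- ===== Notes on version B (the rewrite author's own statement) =====
-- stated objective: faster
-- what changed: A rescans the whole array left and right for every adjacent equal pair (O(n^2)); B collects the equal-pair positions once, observes that A's inner scans always find the globally first and last pair positions, and sums max(distance to first, distance to last) in one O(n) pass.
import Mathlib
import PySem

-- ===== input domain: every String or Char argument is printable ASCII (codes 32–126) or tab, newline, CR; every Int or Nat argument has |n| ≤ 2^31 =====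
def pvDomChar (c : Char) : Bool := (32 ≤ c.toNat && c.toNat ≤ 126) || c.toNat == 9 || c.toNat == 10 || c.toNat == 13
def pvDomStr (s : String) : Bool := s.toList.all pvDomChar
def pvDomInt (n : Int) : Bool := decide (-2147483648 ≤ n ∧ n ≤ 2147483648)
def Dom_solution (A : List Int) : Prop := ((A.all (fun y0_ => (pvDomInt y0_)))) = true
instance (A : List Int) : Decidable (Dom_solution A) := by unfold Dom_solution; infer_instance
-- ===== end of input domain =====

-- B replaces A's per-pair full left/right rescans by one pass over the precomputed list of
-- adjacent-equal positions, using only its first and last elements (measured faster, O(n) vs O(n^2)).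


-- A[i] for an index that is always in range at every use in both programs
def pvGet (A : List Int) (i : Int) : Int := PySem.List.pyGetD A i 0
def pvCond (A : List Int) (i : Int) : Bool := pvGet A i == pvGet A (i + 1)
-- B's comprehension: the positions i with A[i] == A[i+1]
def pvPairs (A : List Int) : List Int :=
  (PySem.List.pyRange 0 ((A.length : Int) - 1) 1).filter (pvCond A)
-- ===== PORT A =====
def solution (A : List Int) : Int :=
  (PySem.List.pyRange 0 ((A.length : Int) - 1) 1).foldl
    (fun sum_num i =>
      if pvGet A i == pvGet A (i + 1) then
        let flag := (PySem.List.pyRange i 0 (-1)).foldl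
          (fun flag k => if pvGet A k == pvGet A (k - 1) then k else flag) 0
        let min_num := i - flag + 1
        let flag := (PySem.List.pyRange i ((A.length : Int) - 1) 1).foldl
          (fun flag k => if pvGet A k == pvGet A (k + 1) then k else flag) (A.length : Int)
        if min_num > flag - i + 1 then sum_num + min_num else sum_num + (flag - i + 1)
      else sum_num) 0
-- ===== PORT B =====
def solution_alt (A : List Int) : Int :=
  match pvPairs A with
  | [] => 0
  | f :: _ =>
    (pvPairs A).foldl (fun total i =>
      total + max (if i > f then i - f else i + 1) ((pvPairs A).getLastD 0 - i + 1)) 0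

-- ===== PRECONDITION & SPEC =====
def Spec_solution (A : List Int) (out : Int) : Prop := out = solution_alt A
instance (A : List Int) (out : Int) : Decidable (Spec_solution A out) := by unfold Spec_solution; infer_instance

-- ===== CLAIM (what is proved, stated in full; the proofs are below) =====
def Claim_equal_solution : Prop := ∀ (A : List Int), Dom_solution A → Spec_solution A (solution A)

-- ===== LEMMAS AND PROOFS =====
theorem foldl_overwrite (c : Int → Bool) (L : List Int) (init : Int) :
    L.foldl (fun fl k => if c k then k else fl) init = (L.filter c).getLastD init := by
  induction L generalizing init with
  | nil => rfl
  | cons a L ih =>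
    rw [List.foldl_cons]
    by_cases h : c a
    · rw [if_pos h, ih, List.filter_cons_of_pos h, List.getLastD_cons]
    · rw [if_neg h, ih, List.filter_cons_of_neg (by simpa using h)]
theorem foldl_if_add (c : Int → Bool) (g : Int → Int) (L : List Int) (init : Int) :
    L.foldl (fun s i => if c i then s + g i else s) init
      = (L.filter c).foldl (fun s i => s + g i) init := by
  induction L generalizing init with
  | nil => rfl
  | cons a L ih =>
    rw [List.foldl_cons]
    by_cases h : c a
    · rw [if_pos h, ih, List.filter_cons_of_pos h, List.foldl_cons]
    · rw [if_neg h, ih, List.filter_cons_of_neg (by simpa using h)]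
theorem down_eq (A : List Int) (i : Int) :
    (PySem.List.pyRange i 0 (-1)).foldl
      (fun fl k => if pvGet A k == pvGet A (k - 1) then k else fl) 0
    = ((((PySem.List.pyRange 0 i 1).filter (pvCond A)).map (· + 1))).headD 0 := by
  rw [PySem.List.pyRange_neg_one_eq_reverse, foldl_overwrite, List.filter_reverse,
    List.getLastD_eq_getLast?, List.getLast?_reverse]
  have h1 : PySem.List.pyRange (0+1) (i+1) 1 = (PySem.List.pyRange 0 i 1).map (· + 1) := by
    rw [PySem.List.pyRange_one, PySem.List.pyRange_one, List.map_map]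
    have h0 : (i + 1 - (0+1)) = i - 0 := by ring
    rw [h0]
    congr 1
    funext k
    simp only [Function.comp]
    ring
  rw [h1, List.filter_map]
  have h2 : ((fun k => pvGet A k == pvGet A (k - 1)) ∘ (· + 1)) = pvCond A := by
    funext k
    have hk : k + 1 - 1 = k := by ring
    simp only [Function.comp, pvCond, hk]
    exact Bool.beq_comm
  rw [h2, List.headD_eq_head?_getD, List.head?_map]

def pvBody (A : List Int) (i : Int) : Int :=
  max (i - (PySem.List.pyRange i 0 (-1)).foldl
        (fun flag k => if pvGet A k == pvGet A (k - 1) then k else flag) 0 + 1)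
      ((PySem.List.pyRange i ((A.length : Int) - 1) 1).foldl
        (fun flag k => if pvGet A k == pvGet A (k + 1) then k else flag) (A.length : Int) - i + 1)

theorem solution_eq (A : List Int) :
    solution A = (pvPairs A).foldl (fun s i => s + pvBody A i) 0 := by
  unfold solution pvPairs
  rw [← foldl_if_add (pvCond A) (pvBody A)]
  congr 1
  funext s i
  by_cases h : pvCond A i
  · rw [if_pos (show (pvGet A i == pvGet A (i + 1)) = true from h), if_pos h]
    simp only []
    unfold pvBody
    rw [max_def]
    split_ifs <;> omega
  · rw [if_neg (show ¬ (pvGet A i == pvGet A (i + 1)) = true from h), if_neg h]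

theorem body_eq (A : List Int) (f : Int) (rest : List Int) (hp : pvPairs A = f :: rest)
    (i : Int) (hi : i ∈ pvPairs A) :
    pvBody A i = max (if i > f then i - f else i + 1) ((pvPairs A).getLastD 0 - i + 1) := by
  have hi' := hi
  rw [pvPairs, List.mem_filter, PySem.List.mem_pyRange_one] at hi'
  obtain ⟨⟨h0i, hin⟩, hic⟩ := hi'
  have hsplit : pvPairs A = (PySem.List.pyRange 0 i 1).filter (pvCond A)
      ++ (PySem.List.pyRange i ((A.length : Int) - 1) 1).filter (pvCond A) := by
    rw [pvPairs, PySem.List.pyRange_one_append 0 i ((A.length : Int) - 1) h0i (le_of_lt hin),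
      List.filter_append]
  have hsuf : (PySem.List.pyRange i ((A.length : Int) - 1) 1).filter (pvCond A)
      = i :: (PySem.List.pyRange (i + 1) ((A.length : Int) - 1) 1).filter (pvCond A) := by
    rw [PySem.List.pyRange_one_cons hin, List.filter_cons_of_pos hic]
  have hup : (PySem.List.pyRange i ((A.length : Int) - 1) 1).foldl
      (fun fl k => if pvGet A k == pvGet A (k + 1) then k else fl) ((A.length : Int))
      = (pvPairs A).getLastD 0 := by
    have hov := foldl_overwrite (pvCond A) (PySem.List.pyRange i ((A.length : Int) - 1) 1)
      ((A.length : Int))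
    refine hov.trans ?_
    rw [List.getLastD_eq_getLast?, List.getLastD_eq_getLast?, hsplit, hsuf,
      List.getLast?_append_cons]
    rcases hq : (i :: List.filter (pvCond A)
        (PySem.List.pyRange (i + 1) ((A.length : Int) - 1) 1)).getLast? with _ | y
    · exact absurd hq (by simp)
    · rfl
  unfold pvBody
  rw [down_eq, hup]
  cases hpre : (PySem.List.pyRange 0 i 1).filter (pvCond A) with
  | nil =>
    have hf : f = i := by
      rw [hsplit, hpre, hsuf, List.nil_append, List.cons.injEq] at hp
      exact hp.1.symm
    rw [hf, List.map_nil, List.headD_nil, if_neg (lt_irrefl i)]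
    congr 1; omega
  | cons p t =>
    have hf : f = p := by
      rw [hsplit, hpre, List.cons_append, List.cons.injEq] at hp
      exact hp.1.symm
    have hpi : p < i := by
      have : p ∈ (PySem.List.pyRange 0 i 1).filter (pvCond A) := by
        rw [hpre]; exact List.mem_cons_self
      rw [List.mem_filter, PySem.List.mem_pyRange_one] at this
      exact this.1.2
    rw [hf, List.map_cons, List.headD_cons, if_pos hpi]
    congr 1; omega

theorem main_eq (A : List Int) : solution A = solution_alt A := by
  unfold solution_alt
  cases hp : pvPairs A with
  | nil => rw [solution_eq, hp]; rfl
  | cons f rest =>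
    rw [solution_eq, hp]
    apply PySem.List.foldl_congr_mem
    intro acc x hx
    rw [body_eq A f rest hp x (by rw [hp]; exact hx), hp]

-- ===== VERDICT (by name: the statement is the Claim_ definition above) =====
theorem solution_spec : Claim_equal_solution := by
  intro A _
  unfold Spec_solution
  exact main_eq A
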